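-- pv_equiv track=rewrite | github.com/heimgewebe/metarepo | metarepo_tools/push_index_property.py | _from_columnar_mapping
-- ===== SOURCE A (Python) =====
-- from collections.abc import Iterable, Iterator, Mapping, Sequence
-- from typing import Any, Dict, List
--
-- def _is_sequence_like(value: Any) -> bool:
--     return isinstance(value, Sequence) and not isinstance(value, (str, bytes, bytearray))
--
-- def _from_columnar_mapping(data: Mapping[str, Any]) -> Iterator[Dict[str, Any]]:
--     columns: List[str] = list(data.keys())
--     normalised: List[List[Any]] = []
--     max_len = 0
--     for key in columns:
--         value = data[key]
--         if _is_sequence_like(value):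
--             values_list = list(value)
--         else:
--             values_list = [value]
--         normalised.append(values_list)
--         max_len = max(max_len, len(values_list))
--
--     for index in range(max_len):
--         row: Dict[str, Any] = {}
--         for column, values in zip(columns, normalised):
--             row[column] = values[index] if index < len(values) else None
--         yield row
-- ===== SOURCE B (Python) =====
-- from collections.abc import Iterable, Iterator, Mapping, Sequence
-- from typing import Any, Dict, List
--
--
-- def _is_sequence_like(value: Any) -> bool:
--     return isinstance(value, Sequence) and not isinstance(value, (str, bytes, bytearray))
--
--
-- def _from_columnar_mapping(data: Mapping[str, Any]) -> Iterator[Dict[str, Any]]: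
--     # Column-major scatter: write each column's values into a growing list of
--     # partial row records; padding falls out of .get() (None) at yield time.
--     columns: List[str] = list(data.keys())
--     rows: List[Dict[str, Any]] = []
--     for key in columns:
--         value = data[key]
--         values_list = list(value) if _is_sequence_like(value) else [value]
--         while len(rows) < len(values_list):
--             rows.append({})
--         for i, item in enumerate(values_list):
--             rows[i][key] = item
--     for partial in rows:
--         yield {column: partial.get(column) for column in columns}
-- ===== Notes on version B (the rewrite author's own statement) =====
-- stated objective: alternative
-- what changed: Replaces A's row-major build (max_len tracking plus an index loop with a per-cell bounds check) by a column-major scatter: each column's values are written into a growing list of partial row records, and the None padding falls out of dict.get at yield time.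
import Mathlib
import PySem

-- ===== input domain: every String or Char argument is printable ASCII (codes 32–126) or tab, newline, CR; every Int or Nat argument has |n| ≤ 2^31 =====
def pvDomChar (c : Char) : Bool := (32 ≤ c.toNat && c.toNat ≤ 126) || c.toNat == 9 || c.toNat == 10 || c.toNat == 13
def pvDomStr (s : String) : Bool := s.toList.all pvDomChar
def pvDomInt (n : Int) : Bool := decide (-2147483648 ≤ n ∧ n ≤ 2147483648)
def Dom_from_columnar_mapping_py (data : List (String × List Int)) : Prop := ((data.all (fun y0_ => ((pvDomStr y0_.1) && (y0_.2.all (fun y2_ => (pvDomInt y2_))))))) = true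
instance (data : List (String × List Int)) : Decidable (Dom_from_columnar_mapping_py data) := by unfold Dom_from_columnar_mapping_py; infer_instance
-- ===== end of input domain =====

-- B replaces A's row-major build (max_len + index loop with a per-cell bounds check) by a
-- column-major scatter into a growing list of partial row records, padding via dict.get at
-- yield time (alternative decomposition, same cost; equivalence is about the returned rows —
-- both Pythons are generators).


-- ===== PORT A =====
-- A: one pass collects the normalised column lists and tracks max_len; a second pass loops
-- `index` over range(max_len) and builds each row with the guard
-- `values[index] if index < len(values) else None`.  (Values are list[int] here, so the
-- _is_sequence_like branch always takes `list(value)` = the list itself.)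
def from_columnar_mapping_py (data : List (String × List Int)) : List (List (String × Option Int)) :=
  let columns : List String := data.map Prod.fst
  let st := columns.foldl
    (fun (acc : List (List Int) × Nat) key =>
      let value : List Int := (PySem.Dict.mk data).getD key []
      let valuesList := value
      (acc.1 ++ [valuesList], max acc.2 valuesList.length))
    ([], 0)
  let normalised := st.1
  let maxLen := st.2
  (List.range maxLen).map (fun index =>
    (List.zip columns normalised).map (fun cv =>
      (cv.1, if index < cv.2.length then some (cv.2.getD index 0) else none)))

-- ===== PORT B =====
-- B's inner loop `for i, item in enumerate(values_list): rows[i][key] = item`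
def pvScatter (key : String) (vs : List Int) (rows : List (PySem.Dict String Int)) :
    List (PySem.Dict String Int) :=
  (vs.zipIdx).foldl
    (fun rs vi => rs.set vi.2 ((rs.getD vi.2 PySem.Dict.empty).insert key vi.1)) rows

-- B: for each column, pad `rows` with empty records up to the column's length (the while loop),
-- scatter the column's values into rows[0..], then yield each partial record read back in
-- column order via .get (None for absent keys).
def from_columnar_mapping_py_alt (data : List (String × List Int)) : List (List (String × Option Int)) :=
  let columns : List String := data.map Prod.fst
  let rows := columns.foldl
    (fun (rows : List (PySem.Dict String Int)) key =>
      let value : List Int := (PySem.Dict.mk data).getD key []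
      let valuesList := value
      let rows := rows ++ List.replicate (valuesList.length - rows.length) PySem.Dict.empty
      pvScatter key valuesList rows)
    []
  rows.map (fun part => columns.map (fun column => (column, part.get? column)))

-- ===== PRECONDITION & SPEC =====
def Spec_from_columnar_mapping_py (data : List (String × List Int)) (out : List (List (String × Option Int))) : Prop := out = from_columnar_mapping_py_alt data
instance (data : List (String × List Int)) (out : List (List (String × Option Int))) : Decidable (Spec_from_columnar_mapping_py data out) := by unfold Spec_from_columnar_mapping_py; infer_instance

-- ===== CLAIM (what is proved, stated in full; the proofs are below) =====
def Claim_equal_from_columnar_mapping_py : Prop := ∀ (data : List (String × List Int)), Dom_from_columnar_mapping_py data → Spec_from_columnar_mapping_py data (from_columnar_mapping_py data)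

-- ===== LEMMAS AND PROOFS =====

-- A's foldl accumulates exactly (the normalised columns in order, the max of their lengths).
theorem pvFold_eq (ks : List String) (f : String → List Int) (acc : List (List Int)) (m : Nat) :
    ks.foldl (fun (acc : List (List Int) × Nat) key => (acc.1 ++ [f key], max acc.2 (f key).length)) (acc, m)
      = (acc ++ ks.map f, (ks.map f).foldl (fun m v => max m v.length) m) := by
  induction ks generalizing acc m with
  | nil => simp
  | cons a l ih => simp [ih]

-- scatter preserves the number of rows
theorem pvScatter_length (key : String) (vs : List Int) (rows : List (PySem.Dict String Int)) :
    (pvScatter key vs rows).length = rows.length := by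
  unfold pvScatter
  induction vs.zipIdx generalizing rows with
  | nil => rfl
  | cons p ps ih => rw [List.foldl_cons, ih]; exact List.length_set ..

-- pointwise effect of the scatter loop (indices stay within vs.length ≤ rows.length)
theorem pvScatter_getD (key : String) (vs : List Int) (rows : List (PySem.Dict String Int))
    (hlen : vs.length ≤ rows.length) (i : Nat) :
    (pvScatter key vs rows).getD i PySem.Dict.empty
      = if i < vs.length
        then (rows.getD i PySem.Dict.empty).insert key (vs.getD i 0)
        else rows.getD i PySem.Dict.empty := by
  induction vs using List.reverseRecOn generalizing i with
  | nil => simp [pvScatter]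
  | append_singleton vs v ih =>
    have hvs : vs.length ≤ rows.length := by simp at hlen; omega
    have hset : pvScatter key (vs ++ [v]) rows
        = (pvScatter key vs rows).set vs.length
            (((pvScatter key vs rows).getD vs.length PySem.Dict.empty).insert key v) := by
      unfold pvScatter
      rw [List.zipIdx_append, List.foldl_append]
      simp
    rw [hset]
    by_cases hi : i = vs.length
    · subst hi
      have hin : vs.length < (pvScatter key vs rows).length := by
        rw [pvScatter_length]; simp at hlen; omega
      rw [List.getD_eq_getElem?_getD, List.getElem?_set_self]
      simp only [Option.getD_some]
      rw [ih hvs]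
      simp [List.getD_eq_getElem?_getD]
      exact hin
    · have hne : (((pvScatter key vs rows).set vs.length
            (((pvScatter key vs rows).getD vs.length PySem.Dict.empty).insert key v)).getD i PySem.Dict.empty)
          = (pvScatter key vs rows).getD i PySem.Dict.empty := by
        simp [List.getD_eq_getElem?_getD, List.getElem?_set_ne (Ne.symm hi)]
      rw [hne, ih hvs]
      by_cases h1 : i < vs.length
      · have hget : (vs ++ [v]).getD i 0 = vs.getD i 0 := by
          rw [List.getD_eq_getElem?_getD, List.getD_eq_getElem?_getD, List.getElem?_append_left h1]
        simp [h1, Nat.le_of_lt h1]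
      · have h2 : ¬ i ≤ vs.length := by omega
        simp [h1, h2]

-- the loop invariant: after processing the prefix `ks`, rows has maxLen-many entries and
-- row i holds exactly the processed columns whose list reaches index i.
def pvInv (L : String → List Int) (ks : List String) (rows : List (PySem.Dict String Int)) : Prop :=
  rows.length = (ks.map L).foldl (fun m v => max m v.length) 0 ∧
  ∀ (i : Nat) (c : String),
    (rows.getD i PySem.Dict.empty).get? c
      = if c ∈ ks ∧ i < (L c).length then some ((L c).getD i 0) else none

theorem pvStep (L : String → List Int) (S : List String) (rows : List (PySem.Dict String Int))
    (k : String) (h : pvInv L S rows) :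
    pvInv L (S ++ [k])
      (pvScatter k (L k) (rows ++ List.replicate ((L k).length - rows.length) PySem.Dict.empty)) := by
  obtain ⟨hlen, hget⟩ := h
  set padded := rows ++ List.replicate ((L k).length - rows.length) PySem.Dict.empty with hpad
  have hplen : padded.length = max rows.length (L k).length := by
    simp [hpad]; omega
  have hple : (L k).length ≤ padded.length := by omega
  have hpget : ∀ (i : Nat), padded.getD i PySem.Dict.empty
      = rows.getD i PySem.Dict.empty := by
    intro i
    rw [List.getD_eq_getElem?_getD, List.getD_eq_getElem?_getD]
    by_cases hi : i < rows.length
    · rw [hpad, List.getElem?_append_left hi]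
    · rw [hpad, List.getElem?_append_right (by omega),
        List.getElem?_eq_none (l := rows) (by omega)]
      cases h : (List.replicate ((L k).length - rows.length) PySem.Dict.empty)[i - rows.length]? with
      | none => rfl
      | some x =>
        rw [List.eq_of_mem_replicate (List.mem_of_getElem? h)]
        rfl
  constructor
  · rw [pvScatter_length, hplen, hlen, List.map_append, List.foldl_append]
    simp only [List.map_cons, List.map_nil, List.foldl_cons, List.foldl_nil]
  · intro i c
    rw [pvScatter_getD _ _ _ hple i, hpget i]
    by_cases hik : i < (L k).length
    · simp only [if_pos hik]
      by_cases hck : c = k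
      · subst hck
        rw [PySem.Dict.get?_insert_self]
        simp [hik]
      · rw [PySem.Dict.get?_insert_of_ne _ _ hck, hget i c]
        simp [hck]
    · simp only [if_neg hik]
      rw [hget i c]
      by_cases hcS : c ∈ S
      · simp [hcS]
      · by_cases hck : c = k
        · subst hck
          simp [hcS, hik]
        · simp [hcS, hck]

theorem pvInv_foldl (L : String → List Int) (ks : List String) :
    ∀ (S : List String) (rows : List (PySem.Dict String Int)), pvInv L S rows →
    pvInv L (S ++ ks)
      (ks.foldl (fun rows key =>
        pvScatter key (L key) (rows ++ List.replicate ((L key).length - rows.length) PySem.Dict.empty)) rows) := by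
  induction ks with
  | nil => intro S rows h; simpa using h
  | cons k ks ih =>
    intro S rows h
    have := ih (S ++ [k]) _ (pvStep L S rows k h)
    simpa using this

-- A's row guard is exactly getElem?
theorem pvRow_eq (cols : List String) (ns : List (List Int)) (i : Nat) :
    (List.zip cols ns).map (fun cv =>
        (cv.1, if i < cv.2.length then some (cv.2.getD i 0) else none))
      = cols.zip (ns.map (fun vs => vs[i]?)) := by
  rw [List.zip_map_right]
  apply List.map_congr_left
  intro cv _
  by_cases h : i < cv.2.length
  · simp [h, Prod.map]
  · simp [h, Prod.map]

-- ===== VERDICT (by name: the statement is the Claim_ definition above) =====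
theorem from_columnar_mapping_py_spec : Claim_equal_from_columnar_mapping_py := by
  intro data _
  show from_columnar_mapping_py data = from_columnar_mapping_py_alt data
  unfold from_columnar_mapping_py from_columnar_mapping_py_alt
  dsimp only
  rw [pvFold_eq (data.map Prod.fst) (fun k => (PySem.Dict.mk data).getD k []) [] 0]
  dsimp only
  have hinv := pvInv_foldl (fun k => (PySem.Dict.mk data).getD k []) (data.map Prod.fst) [] []
    ⟨by simp, by intro i c; simp [List.getD]⟩
  simp only [List.nil_append] at hinv
  obtain ⟨hlen, hget⟩ := hinv
  apply List.ext_getElem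
  · simpa using hlen.symm
  · intro i h1 h2
    simp only [List.getElem_map, List.getElem_range, List.nil_append]
    rw [pvRow_eq]
    have hlt : i < (List.foldl (fun rows key =>
        pvScatter key ((PySem.Dict.mk data).getD key [])
          (rows ++ List.replicate (((PySem.Dict.mk data).getD key []).length - rows.length) PySem.Dict.empty))
        [] (data.map Prod.fst)).length := by
      rw [hlen]; simpa using h1
    apply List.ext_getElem
    · simp
    · intro j hj1 hj2
      have hjd : j < data.length := by simpa using hj2
      rw [List.getElem_zip]
      simp only [List.getElem_map]
      refine Prod.ext rfl ?_
      have hrow := hget i ((data[j]'hjd).1)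
      simp only at hrow
      rw [List.getD_eq_getElem _ PySem.Dict.empty hlt] at hrow
      rw [hrow]
      have hc : (data[j]'hjd).1 ∈ List.map Prod.fst data :=
        List.mem_map_of_mem (List.getElem_mem hjd)
      by_cases hci : i < ((PySem.Dict.mk data).getD ((data[j]'hjd).1) []).length
      · rw [if_pos ⟨hc, hci⟩, List.getElem?_eq_getElem hci, List.getD_eq_getElem _ _ hci]
      · rw [if_neg (by tauto), List.getElem?_eq_none (by omega)]
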